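-- pv_equiv track=rewrite | github.com/writerix/Sixteen-Puzzle-Solver | rotations.py | col_up
-- ===== SOURCE A (Python) =====
-- from copy import deepcopy
--
-- def col_up(matrix, col_num):
--     copy_matrix = deepcopy(matrix)
--     #empty list or single row
--     #doesn't change with col_numumn rotation
--     if len(copy_matrix) <= 1:
--         return copy_matrix
--     bottom_val = copy_matrix[0][col_num]
--
--     for i in range(len(copy_matrix) - 1):
--         copy_matrix[i][col_num] = copy_matrix[i + 1][col_num]
--     copy_matrix[-1][col_num] = bottom_val
--     return copy_matrix
-- ===== SOURCE B (Python) =====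
-- from copy import deepcopy
--
-- def col_up(matrix, col_num):
--     copy_matrix = deepcopy(matrix)
--     # empty list or single row: unchanged by a column rotation
--     if len(copy_matrix) <= 1:
--         return copy_matrix
--     col = [row[col_num] for row in copy_matrix]
--     rot = col[1:] + col[:1]
--     for i, row in enumerate(copy_matrix):
--         row[col_num] = rot[i]
--     return copy_matrix
-- ===== Notes on version B (the rewrite author's own statement) =====
-- stated objective: simpler
-- what changed: B extracts the column as a list, rotates it with one slice concatenation col[1:]+col[:1], and writes it back in a single enumerate pass, instead of A's in-place neighbor-by-neighbor shift with a saved sentinel value and a final negative-index write.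
import Mathlib
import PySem

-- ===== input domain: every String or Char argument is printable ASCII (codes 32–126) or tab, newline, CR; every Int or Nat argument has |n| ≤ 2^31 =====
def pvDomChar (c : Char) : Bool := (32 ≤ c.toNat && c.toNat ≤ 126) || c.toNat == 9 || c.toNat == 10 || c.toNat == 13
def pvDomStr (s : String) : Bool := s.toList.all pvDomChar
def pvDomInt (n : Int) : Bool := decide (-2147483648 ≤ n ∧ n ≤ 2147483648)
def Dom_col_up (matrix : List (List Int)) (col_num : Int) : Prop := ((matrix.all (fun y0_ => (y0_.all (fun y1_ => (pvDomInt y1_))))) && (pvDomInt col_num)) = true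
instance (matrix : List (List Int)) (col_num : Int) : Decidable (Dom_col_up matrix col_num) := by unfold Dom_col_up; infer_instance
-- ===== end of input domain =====

-- B replaces A's in-place neighbor shift with an extract-column / rotate-by-slice / write-back decomposition; objective: simpler.


-- ===== PORT A =====
def col_up (matrix : List (List Int)) (col_num : Int) : List (List Int) :=
  let copy_matrix := matrix
  if copy_matrix.length ≤ 1 then copy_matrix
  else
    let bottom_val : Int :=
      PySem.List.pyGetD (PySem.List.pyGetD copy_matrix 0 []) col_num 0
    let cm :=
      (PySem.List.pyRange 0 ((copy_matrix.length : Int) - 1) 1).foldl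
        (fun acc i =>
          PySem.List.pySetD acc i
            (PySem.List.pySetD (PySem.List.pyGetD acc i []) col_num
              (PySem.List.pyGetD (PySem.List.pyGetD acc (i + 1) []) col_num 0)))
        copy_matrix
    PySem.List.pySetD cm (-1)
      (PySem.List.pySetD (PySem.List.pyGetD cm (-1) []) col_num bottom_val)

-- ===== PORT B =====
def col_up_alt (matrix : List (List Int)) (col_num : Int) : List (List Int) :=
  let copy_matrix := matrix
  if copy_matrix.length ≤ 1 then copy_matrix
  else
    let col := copy_matrix.map (fun row => PySem.List.pyGetD row col_num 0)
    let rot := PySem.List.slice col (some 1) none ++ PySem.List.slice col none (some 1)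
    (PySem.List.enumerate copy_matrix 0).map
      (fun p => PySem.List.pySetD p.2 col_num (PySem.List.pyGetD rot p.1 0))

-- ===== PRECONDITION & SPEC =====
-- Pre_ excludes exactly the inputs on which Python A raises IndexError: a matrix
-- with at least two rows in which col_num is out of range for some row.
def Pre_col_up (matrix : List (List Int)) (col_num : Int) : Prop :=
  matrix.length ≤ 1 ∨ ∀ row ∈ matrix, PySem.Raise.InRange row.length col_num
instance (matrix : List (List Int)) (col_num : Int) : Decidable (Pre_col_up matrix col_num) := by unfold Pre_col_up; infer_instance
def pvWitness_col_up : List (List Int) × Int := ([[1, 2], [3, 4], [5, 6]], 0)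

def Spec_col_up (matrix : List (List Int)) (col_num : Int) (out : List (List Int)) : Prop := out = col_up_alt matrix col_num
instance (matrix : List (List Int)) (col_num : Int) (out : List (List Int)) : Decidable (Spec_col_up matrix col_num out) := by unfold Spec_col_up; infer_instance

-- ===== CLAIM (what is proved, stated in full; the proofs are below) =====
def Claim_equal_col_up : Prop := ∀ (matrix : List (List Int)) (col_num : Int), Dom_col_up matrix col_num → Pre_col_up matrix col_num → Spec_col_up matrix col_num (col_up matrix col_num)

-- ===== LEMMAS AND PROOFS =====

theorem pv_getD_mid {α : Type} [Inhabited α] (u t : List α) (r d : α) :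
    PySem.List.pyGetD (u ++ r :: t) (u.length : Int) d = r := by
  simp [PySem.List.pyGetD_natCast, List.getD_eq_getElem?_getD]

theorem pv_getD_mid2 {α : Type} [Inhabited α] (u t : List α) (r s d : α) :
    PySem.List.pyGetD (u ++ r :: s :: t) ((u.length : Int) + 1) d = s := by
  have : ((u.length : Int) + 1) = ((u.length + 1 : Nat) : Int) := by push_cast; ring
  rw [this, PySem.List.pyGetD_natCast]
  have h : u ++ r :: s :: t = (u ++ [r]) ++ s :: t := by simp
  rw [h]
  have := pv_getD_mid (α := α) (u ++ [r]) t s d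
  rw [PySem.List.pyGetD_natCast] at this
  simpa using this

theorem pv_setD_mid {α : Type} (u t : List α) (r x : α) :
    PySem.List.pySetD (u ++ r :: t) (u.length : Int) x = u ++ x :: t := by
  rw [PySem.List.pySetD_natCast]
  simp [List.set_append]

-- A's loop: starting from u ++ v ++ [w] with the loop counter at u.length, each row of v
-- is overwritten (in its col_num slot) with the column value of the NEXT original row.
theorem pv_foldA (col_num : Int) (v : List (List Int)) :
    ∀ (u : List (List Int)) (w : List Int),
    (PySem.List.pyRange (u.length : Int) ((u.length : Int) + (v.length : Int)) 1).foldl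
        (fun acc i =>
          PySem.List.pySetD acc i
            (PySem.List.pySetD (PySem.List.pyGetD acc i []) col_num
              (PySem.List.pyGetD (PySem.List.pyGetD acc (i + 1) []) col_num 0)))
        (u ++ v ++ [w])
      = u ++ (List.zipWith
          (fun r rn => PySem.List.pySetD r col_num (PySem.List.pyGetD rn col_num 0))
          v (v.drop 1 ++ [w])) ++ [w] := by
  induction v with
  | nil =>
      intro u w
      rw [PySem.List.pyRange_one_eq_nil (by simp)]
      simp
  | cons r v' ih =>
      intro u w
      rw [PySem.List.pyRange_one_cons (by push_cast [List.length_cons]; omega)]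
      simp only [List.foldl_cons]
      have hnext : PySem.List.pyGetD (u ++ (r :: v') ++ [w]) ((u.length : Int) + 1) []
          = (v' ++ [w]).headI := by
        cases v' with
        | nil => simpa using pv_getD_mid2 u [] r w []
        | cons s t => simpa using pv_getD_mid2 u (t ++ [w]) r s []
      have hget : PySem.List.pyGetD (u ++ (r :: v') ++ [w]) (u.length : Int) [] = r := by
        simpa using pv_getD_mid u (v' ++ [w]) r []
      rw [show u ++ (r :: v') ++ [w] = u ++ r :: (v' ++ [w]) by simp] at *
      rw [hget, hnext, pv_setD_mid]
      have hu' : u ++ (PySem.List.pySetD r col_num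
            (PySem.List.pyGetD (v' ++ [w]).headI col_num 0)) :: (v' ++ [w])
          = (u ++ [PySem.List.pySetD r col_num
              (PySem.List.pyGetD (v' ++ [w]).headI col_num 0)]) ++ v' ++ [w] := by simp
      rw [hu']
      have hlen : ((u.length : Int) + 1)
          = (((u ++ [PySem.List.pySetD r col_num
              (PySem.List.pyGetD (v' ++ [w]).headI col_num 0)]).length : Nat) : Int) := by
        simp
      have hlen2 : (u.length : Int) + ((r :: v').length : Int)
          = (((u ++ [PySem.List.pySetD r col_num
              (PySem.List.pyGetD (v' ++ [w]).headI col_num 0)]).length : Nat) : Int)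
            + (v'.length : Int) := by
        simp; push_cast; ring
      rw [hlen, hlen2, ih]
      cases v' with
      | nil => simp
      | cons s t => simp

-- B's write-back pass over enumerate is a zipWith against the rotated column.
theorem pv_foldB (col_num : Int) (rot : List Int) (xs : List (List Int)) :
    ∀ (s : Nat), s + xs.length ≤ rot.length →
    (PySem.List.enumerate xs (s : Int)).map
        (fun p => PySem.List.pySetD p.2 col_num (PySem.List.pyGetD rot p.1 0))
      = List.zipWith (fun r x => PySem.List.pySetD r col_num x) xs (rot.drop s) := by
  induction xs with
  | nil => intro s _; simp [PySem.List.enumerate_nil]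
  | cons x t ih =>
      intro s hs
      rw [PySem.List.enumerate_cons]
      simp only [List.map_cons]
      have hlt : s < rot.length := by simp at hs; omega
      have hdrop : rot.drop s = rot[s] :: rot.drop (s + 1) := by
        rw [List.drop_eq_getElem_cons hlt]
      rw [hdrop]
      simp only [List.zipWith_cons_cons]
      congr 1
      · rw [PySem.List.pyGetD_natCast]
        rw [List.getD_eq_getElem?_getD, List.getElem?_eq_getElem hlt]
        rfl
      · have := ih (s + 1) (by simp at hs ⊢; omega)
        rw [show ((s : Int) + 1) = ((s + 1 : Nat) : Int) by push_cast; ring]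
        exact this

theorem pv_setD_neg_one {α : Type} (u : List α) (r x : α) :
    PySem.List.pySetD (u ++ [r]) (-1) x = u ++ [x] := by
  simp [PySem.List.pySetD, PySem.List.pySet?, PySem.List.pyIdx?]

-- ===== VERDICT (by name: the statement is the Claim_ definition above) =====
theorem col_up_spec : Claim_equal_col_up := by
  intro matrix col_num _ _
  unfold Spec_col_up col_up col_up_alt
  by_cases h1 : matrix.length ≤ 1
  · simp [h1]
  · simp only [h1, if_false]
    -- decompose matrix = v ++ [w] with v nonempty
    obtain ⟨r0, rest, rfl⟩ : ∃ r0 rest, matrix = r0 :: rest := by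
      cases matrix with
      | nil => simp at h1
      | cons a b => exact ⟨a, b, rfl⟩
    obtain ⟨v, w, hvw⟩ : ∃ v w, (r0 :: rest) = v ++ [w] ∧ v ≠ [] := by
      have hne : rest ≠ [] := by intro h; subst h; simp at h1
      exact ⟨r0 :: rest.dropLast, rest.getLast hne,
        by simp [List.dropLast_append_getLast hne], by simp⟩
    obtain ⟨hvw, hvne⟩ := hvw
    -- A side: apply the fold lemma with u := []
    have hlenA : ((r0 :: rest).length : Int) - 1 = (v.length : Int) := by
      have : (r0 :: rest).length = v.length + 1 := by rw [hvw]; simp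
      rw [this]; push_cast; ring
    have foldA := pv_foldA col_num v ([] : List (List Int)) w
    simp only [List.length_nil, Nat.cast_zero, zero_add, List.nil_append] at foldA
    rw [hlenA, hvw, foldA]
    -- finish A's last assignment
    rw [PySem.List.pyGetD_neg_one_append_singleton, pv_setD_neg_one]
    -- bottom_val: matrix[0] = r0
    have hbot : PySem.List.pyGetD (v ++ [w]) (0 : Int) ([] : List Int) = r0 := by
      rw [← hvw, PySem.List.pyGetD_zero_cons]
    rw [hbot]
    -- B side
    have hrotlen : (((v ++ [w]).map (fun row => PySem.List.pyGetD row col_num 0)).drop 1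
        ++ [PySem.List.pyGetD r0 col_num 0]).length = v.length + 1 := by
      simp
    have hcol1 : PySem.List.slice ((v ++ [w]).map (fun row => PySem.List.pyGetD row col_num 0))
        (some 1) none = ((v ++ [w]).map (fun row => PySem.List.pyGetD row col_num 0)).drop 1 := by
      simpa using PySem.List.slice_from_natCast
        ((v ++ [w]).map (fun row => PySem.List.pyGetD row col_num 0)) 1
    have hcol0 : PySem.List.slice ((v ++ [w]).map (fun row => PySem.List.pyGetD row col_num 0))
        none (some 1) = [PySem.List.pyGetD r0 col_num 0] := by
      have := PySem.List.slice_to_natCast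
        ((v ++ [w]).map (fun row => PySem.List.pyGetD row col_num 0)) 1
      rw [← hvw] at this ⊢
      simpa using this
    rw [hcol1, hcol0]
    have hB := pv_foldB col_num
      (((v ++ [w]).map (fun row => PySem.List.pyGetD row col_num 0)).drop 1
        ++ [PySem.List.pyGetD r0 col_num 0]) (v ++ [w]) 0 (by simp)
    simp only [Nat.cast_zero, List.drop_zero] at hB
    rw [hB]
    -- tail of the column is the column of the tail
    have htail : ((v ++ [w]).map (fun row => PySem.List.pyGetD row col_num 0)).drop 1
        = (v.drop 1 ++ [w]).map (fun row => PySem.List.pyGetD row col_num 0) := by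
      rw [← List.map_drop]
      congr 1
      cases v with
      | nil => exact absurd rfl hvne
      | cons a t => simp
    rw [htail]
    -- split the zipWith at the boundary between v and [w]
    have hv1 : 0 < v.length := List.length_pos_of_ne_nil hvne
    rw [List.zipWith_append (by simp; omega)]
    rw [List.zipWith_map_right]
    simp
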